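-- pv_equiv track=rewrite | github.com/TANIGUCHIREI/Yuruyuru_Search | データベース作成/c3_add_infos_for_search/create_embedding_vector_from_res.py | decode_filename
-- ===== SOURCE A (Python) =====
-- def decode_filename(filename):
--     """encodeしたファイル名をdecodeして戻す"""
--     replacements = {
--         '_enc-01': '<',
--         '_enc-02': '>',
--         '_enc-03': ':',
--         '_enc-04': '"',
--         '_enc-05': '/',
--         '_enc-06': '\\',
--         '_enc-07': '|',
--         '_enc-08': '?',
--         '_enc-09': '*',
--         '_enc-10': '&',
--         '_enc-11': '+',
--         '_enc-12': '#',
--         '_enc-13': '%',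
--         '_enc-14': "'",
--         '_enc-15': '`',
--         '_enc-16': '^',
--         '_enc-17': ')',
--         '_enc-18': '(',
--         '_enc-19': '}',
--         '_enc-20': '{',
--         '_enc-21': ']',
--         '_enc-22': '[',
--         '_enc-23': ';',
--         '_enc-24': '@',
--         '_enc-25': '=',
--         '_enc-26': '$',
--         '_enc-27': ',',
--         '_enc-28': ' ',
--         '_enc-29': '　',
--         '_enc-30':'（',
--         '_enc-31':'）',
--     }
--     for src, target in replacements.items():
--         filename = filename.replace(src, target)
--     return filename
-- ===== SOURCE B (Python) =====
-- def decode_filename(filename):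
--     """encodeしたファイル名をdecodeして戻す — single left-to-right scan with a dict lookup on 7-char windows"""
--     replacements = {
--         '_enc-01': '<', '_enc-02': '>', '_enc-03': ':', '_enc-04': '"',
--         '_enc-05': '/', '_enc-06': '\\', '_enc-07': '|', '_enc-08': '?',
--         '_enc-09': '*', '_enc-10': '&', '_enc-11': '+', '_enc-12': '#',
--         '_enc-13': '%', '_enc-14': "'", '_enc-15': '`', '_enc-16': '^',
--         '_enc-17': ')', '_enc-18': '(', '_enc-19': '}', '_enc-20': '{',
--         '_enc-21': ']', '_enc-22': '[', '_enc-23': ';', '_enc-24': '@',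
--         '_enc-25': '=', '_enc-26': '$', '_enc-27': ',', '_enc-28': ' ',
--         '_enc-29': '　', '_enc-30': '（', '_enc-31': '）',
--     }
--     parts = []
--     i = 0
--     n = len(filename)
--     while i < n:
--         repl = replacements.get(filename[i:i + 7])
--         if repl is not None:
--             parts.append(repl)
--             i += 7
--         else:
--             parts.append(filename[i])
--             i += 1
--     return ''.join(parts)
-- ===== Notes on version B (the rewrite author's own statement) =====
-- stated objective: alternative
-- what changed: B replaces A's 31 sequential whole-string replace passes with a single left-to-right scan that looks each 7-character window up in the same replacements dict, emitting the mapped character on a hit (advance 7) or copying one character (advance 1).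
import Mathlib
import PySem

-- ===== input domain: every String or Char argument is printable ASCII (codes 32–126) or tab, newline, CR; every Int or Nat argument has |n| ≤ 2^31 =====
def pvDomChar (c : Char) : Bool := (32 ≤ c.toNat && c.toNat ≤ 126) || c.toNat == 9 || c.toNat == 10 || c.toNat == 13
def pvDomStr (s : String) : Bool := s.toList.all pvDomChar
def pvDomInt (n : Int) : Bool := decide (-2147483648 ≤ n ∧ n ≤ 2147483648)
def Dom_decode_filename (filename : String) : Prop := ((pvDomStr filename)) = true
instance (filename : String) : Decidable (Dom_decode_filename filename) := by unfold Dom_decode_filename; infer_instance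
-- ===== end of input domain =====

-- B replaces A's 31 whole-string replace passes by ONE left-to-right scan that looks each
-- 7-character window up in the same replacements dict (objective: alternative single-pass algorithm).

-- ===== PORT A =====
-- the dict literal of decode_filename (insertion order, distinct keys)
def replA : PySem.Dict String String := PySem.Dict.mk [
    ("_enc-01", "<"),
    ("_enc-02", ">"),
    ("_enc-03", ":"),
    ("_enc-04", "\""),
    ("_enc-05", "/"),
    ("_enc-06", "\\"),
    ("_enc-07", "|"),
    ("_enc-08", "?"),
    ("_enc-09", "*"),
    ("_enc-10", "&"),
    ("_enc-11", "+"),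
    ("_enc-12", "#"),
    ("_enc-13", "%"),
    ("_enc-14", "'"),
    ("_enc-15", "`"),
    ("_enc-16", "^"),
    ("_enc-17", ")"),
    ("_enc-18", "("),
    ("_enc-19", "}"),
    ("_enc-20", "{"),
    ("_enc-21", "]"),
    ("_enc-22", "["),
    ("_enc-23", ";"),
    ("_enc-24", "@"),
    ("_enc-25", "="),
    ("_enc-26", "$"),
    ("_enc-27", ","),
    ("_enc-28", " "),
    ("_enc-29", "　"),
    ("_enc-30", "（"),
    ("_enc-31", "）")]

def decode_filename (filename : String) : String :=
  replA.items.foldl (fun s kv => PySem.Str.replace s kv.1 kv.2) filename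

-- ===== PORT B =====
-- the same replacements dict, keyed by the 7-character tokens (as char lists)
def tblB : PySem.Dict (List Char) (List Char) := PySem.Dict.mk [
    (['_', 'e', 'n', 'c', '-', '0', '1'], ['<']),
    (['_', 'e', 'n', 'c', '-', '0', '2'], ['>']),
    (['_', 'e', 'n', 'c', '-', '0', '3'], [':']),
    (['_', 'e', 'n', 'c', '-', '0', '4'], ['"']),
    (['_', 'e', 'n', 'c', '-', '0', '5'], ['/']),
    (['_', 'e', 'n', 'c', '-', '0', '6'], ['\\']),
    (['_', 'e', 'n', 'c', '-', '0', '7'], ['|']),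
    (['_', 'e', 'n', 'c', '-', '0', '8'], ['?']),
    (['_', 'e', 'n', 'c', '-', '0', '9'], ['*']),
    (['_', 'e', 'n', 'c', '-', '1', '0'], ['&']),
    (['_', 'e', 'n', 'c', '-', '1', '1'], ['+']),
    (['_', 'e', 'n', 'c', '-', '1', '2'], ['#']),
    (['_', 'e', 'n', 'c', '-', '1', '3'], ['%']),
    (['_', 'e', 'n', 'c', '-', '1', '4'], ['\'']),
    (['_', 'e', 'n', 'c', '-', '1', '5'], ['`']),
    (['_', 'e', 'n', 'c', '-', '1', '6'], ['^']),
    (['_', 'e', 'n', 'c', '-', '1', '7'], [')']),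
    (['_', 'e', 'n', 'c', '-', '1', '8'], ['(']),
    (['_', 'e', 'n', 'c', '-', '1', '9'], ['}']),
    (['_', 'e', 'n', 'c', '-', '2', '0'], ['{']),
    (['_', 'e', 'n', 'c', '-', '2', '1'], [']']),
    (['_', 'e', 'n', 'c', '-', '2', '2'], ['[']),
    (['_', 'e', 'n', 'c', '-', '2', '3'], [';']),
    (['_', 'e', 'n', 'c', '-', '2', '4'], ['@']),
    (['_', 'e', 'n', 'c', '-', '2', '5'], ['=']),
    (['_', 'e', 'n', 'c', '-', '2', '6'], ['$']),
    (['_', 'e', 'n', 'c', '-', '2', '7'], [',']),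
    (['_', 'e', 'n', 'c', '-', '2', '8'], [' ']),
    (['_', 'e', 'n', 'c', '-', '2', '9'], ['　']),
    (['_', 'e', 'n', 'c', '-', '3', '0'], ['（']),
    (['_', 'e', 'n', 'c', '-', '3', '1'], ['）'])]

-- the while-loop of Source B: look the 7-char window up; on a hit emit the value and advance 7, else copy one char
def decodeGo (cs : List Char) : List Char :=
  match cs with
  | [] => []
  | c :: t =>
    match tblB.get? (List.take 7 (c :: t)) with
    | some v => v ++ decodeGo (List.drop 6 t)
    | none => c :: decodeGo t
termination_by cs.length
decreasing_by
  · simp only [List.length_cons]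
    have : (List.drop 6 t).length = t.length - 6 := List.length_drop
    omega
  · simp

def decode_filename_alt (filename : String) : String :=
  String.ofList (decodeGo filename.toList)

-- ===== PRECONDITION & SPEC =====
def Spec_decode_filename (filename : String) (out : String) : Prop := out = decode_filename_alt filename
instance (filename : String) (out : String) : Decidable (Spec_decode_filename filename out) := by unfold Spec_decode_filename; infer_instance

-- ===== CLAIM (what is proved, stated in full; the proofs are below) =====
def Claim_equal_decode_filename : Prop := ∀ (filename : String), Dom_decode_filename filename → Spec_decode_filename filename (decode_filename filename)

-- ===== LEMMAS AND PROOFS =====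
def repC (old nw : List Char) (s : List Char) : List Char :=
  match s with
  | [] => []
  | c :: t =>
    if old.isPrefixOf (c :: t) then nw ++ repC old nw (List.drop (old.length - 1) t)
    else c :: repC old nw t
termination_by s.length
decreasing_by
  · simp only [List.length_cons]
    have : (List.drop (old.length - 1) t).length = t.length - (old.length - 1) := List.length_drop
    omega
  · simp

lemma go_eq_repC (old nw : List Char) (hold : old ≠ []) :
    ∀ (fuel : Nat) (l acc : List Char), l.length ≤ fuel →
      PySem.Chars.replace.go old nw fuel l acc = acc.reverse ++ repC old nw l := by
  intro fuel
  induction fuel with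
  | zero =>
    intro l acc h
    have hl : l = [] := by cases l <;> simp_all
    subst hl
    simp [PySem.Chars.replace.go, repC]
  | succ n ih =>
    intro l acc h
    cases l with
    | nil => simp [PySem.Chars.replace.go, repC]
    | cons c t =>
      obtain ⟨d, old', rfl⟩ : ∃ d old', old = d :: old' := by
        cases old with
        | nil => exact absurd rfl hold
        | cons d o => exact ⟨d, o, rfl⟩
      rw [PySem.Chars.replace.go, repC]
      by_cases hp : (d :: old').isPrefixOf (c :: t)
      · rw [if_pos hp, if_pos hp]
        rw [ih]
        · simp [List.drop_succ_cons]
        · simp only [List.length_cons, List.length_drop] at h ⊢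
          omega
      · rw [if_neg hp, if_neg hp]
        rw [ih]
        · simp
        · simp only [List.length_cons] at h
          omega

lemma replace_eq_repC (old nw s : List Char) (h : old ≠ []) :
    PySem.Chars.replace s old nw = repC old nw s := by
  rw [PySem.Chars.replace]
  rw [if_neg (by simpa using h)]
  rw [go_eq_repC old nw h s.length s [] le_rfl]
  simp
lemma repC_cons_of_not_prefix (k nw : List Char) (c : Char) (t : List Char)
    (h : ¬ k <+: (c :: t)) : repC k nw (c :: t) = c :: repC k nw t := by
  rw [repC, if_neg (by simpa [List.isPrefixOf_iff_prefix] using h)]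

lemma repC_append_self (k nw u : List Char) (hk : k ≠ []) :
    repC k nw (k ++ u) = nw ++ repC k nw u := by
  obtain ⟨d, k', rfl⟩ : ∃ d k', k = d :: k' := by
    cases k with
    | nil => exact absurd rfl hk
    | cons d o => exact ⟨d, o, rfl⟩
  rw [List.cons_append, repC, if_pos (by rw [List.isPrefixOf_iff_prefix]; exact ⟨u, by simp⟩)]
  have hd : List.drop ((d :: k').length - 1) (k' ++ u) = u := by
    simp
  rw [hd]
lemma prefix_of_prefix_repC (k nw : List Char) (hnw : nw ≠ []) :
    ∀ (t p : List Char), (∀ ch ∈ p, ch ∉ nw) → p <+: repC k nw t → p <+: t := by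
  intro t
  induction t with
  | nil => intro p _ hp; simpa [repC] using hp
  | cons c t ih =>
    intro p hdisj hp
    by_cases hpre : k.isPrefixOf (c :: t)
    · rw [repC, if_pos hpre] at hp
      cases p with
      | nil => exact List.nil_prefix
      | cons x p' =>
        obtain ⟨w, nw', rfl⟩ : ∃ w nw', nw = w :: nw' := by
          cases nw with
          | nil => exact absurd rfl hnw
          | cons w o => exact ⟨w, o, rfl⟩
        rw [List.cons_append, List.cons_prefix_cons] at hp
        exact absurd (hp.1 ▸ List.mem_cons_self) (hdisj x List.mem_cons_self)
    · rw [repC, if_neg hpre] at hp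
      cases p with
      | nil => exact List.nil_prefix
      | cons x p' =>
        rw [List.cons_prefix_cons] at hp ⊢
        exact ⟨hp.1, ih p' (fun ch hch => hdisj ch (List.mem_cons_of_mem x hch)) hp.2⟩

lemma not_prefix_cons_repC (k0 v0 k : List Char) (c : Char) (t : List Char)
    (hv0 : v0 ≠ []) (hdisj : ∀ ch ∈ k, ch ∉ v0) (h : ¬ k <+: (c :: t)) :
    ¬ k <+: (c :: repC k0 v0 t) := by
  intro hp
  cases k with
  | nil => exact h List.nil_prefix
  | cons x k' =>
    rw [List.cons_prefix_cons] at hp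
    have h2 := prefix_of_prefix_repC k0 v0 hv0 t k'
      (fun ch hch => hdisj ch (List.mem_cons_of_mem x hch)) hp.2
    exact h (List.cons_prefix_cons.mpr ⟨hp.1, h2⟩)

lemma repC_append_left (k' v' m u : List Char) (hh : k'.head? = some '_')
    (hm : ∀ ch ∈ m, ch ≠ '_') : repC k' v' (m ++ u) = m ++ repC k' v' u := by
  induction m with
  | nil => simp
  | cons c m' ih =>
    obtain ⟨k'' , hk'⟩ : ∃ k'', k' = '_' :: k'' := by
      cases k' with
      | nil => simp at hh
      | cons a b => simp at hh; exact ⟨b, by rw [hh]⟩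
    rw [List.cons_append, repC_cons_of_not_prefix]
    · rw [ih (fun ch hch => hm ch (List.mem_cons_of_mem c hch))]; simp
    · rw [hk', List.cons_prefix_cons]
      rintro ⟨h1, -⟩
      exact hm c List.mem_cons_self h1.symm

lemma not_prefix_append_of_ne (k k' : List Char) (u : List Char)
    (hlen : k'.length = k.length) (hne : k' ≠ k) : ¬ k' <+: (k ++ u) := by
  intro h
  have := List.prefix_iff_eq_take.mp h
  rw [List.take_append_of_le_length (by omega)] at this
  rw [hlen, List.take_length] at this
  exact hne this

lemma repC_append_key (k k' v' u : List Char) (hlen : k'.length = k.length) (hne : k' ≠ k)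
    (hh : k'.head? = some '_') (htail : ∀ ch ∈ k.tail, ch ≠ '_') (hk : k ≠ []) :
    repC k' v' (k ++ u) = k ++ repC k' v' u := by
  obtain ⟨c, kt, rfl⟩ : ∃ c kt, k = c :: kt := by
    cases k with
    | nil => exact absurd rfl hk
    | cons a b => exact ⟨a, b, rfl⟩
  rw [List.cons_append, repC_cons_of_not_prefix k' v' c (kt ++ u)
    (by rw [← List.cons_append]; exact not_prefix_append_of_ne _ _ u hlen hne)]
  rw [repC_append_left k' v' kt u hh (by simpa using htail)]; simp
def foldRepC (T : List (List Char × List Char)) (s : List Char) : List Char :=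
  T.foldl (fun acc kv => repC kv.1 kv.2 acc) s

lemma fold_append_left (T : List (List Char × List Char)) (m : List Char)
    (hm : ∀ ch ∈ m, ch ≠ '_') (hT : ∀ kv ∈ T, kv.1.head? = some '_') :
    ∀ u, foldRepC T (m ++ u) = m ++ foldRepC T u := by
  induction T with
  | nil => intro u; simp [foldRepC]
  | cons kv R ih =>
    intro u
    simp only [foldRepC, List.foldl_cons]
    rw [repC_append_left kv.1 kv.2 m u (hT kv List.mem_cons_self) hm]
    exact ih (fun p hp => hT p (List.mem_cons_of_mem kv hp)) (repC kv.1 kv.2 u)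

lemma fold_cons (T : List (List Char × List Char))
    (hv : ∀ kv ∈ T, kv.2 ≠ [])
    (hdisj : ∀ kv ∈ T, ∀ kv' ∈ T, ∀ ch ∈ kv.1, ch ∉ kv'.2) :
    ∀ (c : Char) (t : List Char), (∀ kv ∈ T, ¬ kv.1 <+: (c :: t)) →
    foldRepC T (c :: t) = c :: foldRepC T t := by
  induction T with
  | nil => intro c t _; simp [foldRepC]
  | cons kv R ih =>
    intro c t hnp
    simp only [foldRepC, List.foldl_cons]
    rw [repC_cons_of_not_prefix kv.1 kv.2 c t (hnp kv List.mem_cons_self)]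
    refine ih (fun p hp => hv p (List.mem_cons_of_mem kv hp))
      (fun p hp q hq => hdisj p (List.mem_cons_of_mem kv hp) q (List.mem_cons_of_mem kv hq))
      c (repC kv.1 kv.2 t) ?_
    intro p hp
    exact not_prefix_cons_repC kv.1 kv.2 p.1 c t (hv kv List.mem_cons_self)
      (fun ch hch => hdisj p (List.mem_cons_of_mem kv hp) kv List.mem_cons_self ch hch)
      (hnp p (List.mem_cons_of_mem kv hp))

lemma fold_append_key (T : List (List Char × List Char)) (k vl : List Char) :
    ∀ (u : List Char),
    (∀ kv ∈ T, kv.1.length = 7 ∧ kv.1.head? = some '_' ∧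
      (∀ ch ∈ kv.1.tail, ch ≠ '_') ∧ (∀ ch ∈ kv.2, ch ≠ '_') ∧ kv.2 ≠ []) →
    (k, vl) ∈ T → (T.map Prod.fst).Nodup →
    foldRepC T (k ++ u) = vl ++ foldRepC T u := by
  induction T with
  | nil => intro u _ hmem _; simp at hmem
  | cons kv R ih =>
    intro u hprops hmem hnd
    have hpk := hprops (k, vl) hmem
    have hk : k ≠ [] := by intro h; rw [h] at hpk; simp at hpk
    have hpropsR : ∀ p ∈ R, p.1.length = 7 ∧ p.1.head? = some '_' ∧
        (∀ ch ∈ p.1.tail, ch ≠ '_') ∧ (∀ ch ∈ p.2, ch ≠ '_') ∧ p.2 ≠ [] :=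
      fun p hp => hprops p (List.mem_cons_of_mem kv hp)
    have hhR : ∀ p ∈ R, p.1.head? = some '_' := fun p hp => (hpropsR p hp).2.1
    simp only [foldRepC, List.foldl_cons]
    by_cases heq : kv.1 = k
    · have hvl : kv.2 = vl := by
        rcases List.mem_cons.mp hmem with h | h
        · rw [← h]
        · exfalso
          have hmm : k ∈ R.map Prod.fst := List.mem_map.mpr ⟨(k, vl), h, rfl⟩
          rw [List.map_cons, List.nodup_cons] at hnd
          exact hnd.1 (heq ▸ hmm)
      rw [heq, hvl, repC_append_self k vl u hk]
      exact fold_append_left R vl (hpk.2.2.2.1 : ∀ ch ∈ vl, ch ≠ '_') hhR (repC k vl u)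
    · have hmemR : (k, vl) ∈ R := by
        rcases List.mem_cons.mp hmem with h | h
        · exact absurd (congrArg Prod.fst h.symm) heq
        · exact h
      have hpkv := hprops kv List.mem_cons_self
      rw [repC_append_key k kv.1 kv.2 u (by rw [hpkv.1, hpk.1]) heq hpkv.2.1 hpk.2.2.1 hk]
      exact ih (repC kv.1 kv.2 u) hpropsR hmemR (by rw [List.map_cons, List.nodup_cons] at hnd; exact hnd.2)
def tblOK : Bool := tblB.items.all (fun kv => kv.1.length == 7 && kv.1.head? == some '_' &&
    kv.1.tail.all (fun ch => ch != '_') && kv.2.all (fun ch => ch != '_') && !kv.2.isEmpty)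

set_option maxRecDepth 16384 in
lemma tblOK_true : tblOK = true := by decide

lemma tbl_props : ∀ kv ∈ tblB.items, kv.1.length = 7 ∧ kv.1.head? = some '_' ∧
    (∀ ch ∈ kv.1.tail, ch ≠ '_') ∧ (∀ ch ∈ kv.2, ch ≠ '_') ∧ kv.2 ≠ [] := by
  intro kv hkv
  have h := List.all_eq_true.mp tblOK_true kv hkv
  simp only [Bool.and_eq_true, beq_iff_eq, List.all_eq_true, bne_iff_ne, Bool.not_eq_true',
    List.isEmpty_eq_false_iff] at h
  exact ⟨h.1.1.1.1, h.1.1.1.2, h.1.1.2, h.1.2, h.2⟩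

set_option maxRecDepth 16384 in
lemma tbl_nodup : (tblB.items.map Prod.fst).Nodup := by decide

def tblDisjOK : Bool := tblB.items.all (fun kv => tblB.items.all (fun kv' =>
    kv.1.all (fun ch => !kv'.2.contains ch)))

set_option maxRecDepth 16384 in
lemma tblDisjOK_true : tblDisjOK = true := by decide

lemma tbl_disj : ∀ kv ∈ tblB.items, ∀ kv' ∈ tblB.items, ∀ ch ∈ kv.1, ch ∉ kv'.2 := by
  intro kv hkv kv' hkv' ch hch
  have h := List.all_eq_true.mp (List.all_eq_true.mp (List.all_eq_true.mp tblDisjOK_true kv hkv) kv' hkv') ch hch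
  simpa using h

lemma fold_nil (T : List (List Char × List Char)) : foldRepC T [] = [] := by
  induction T with
  | nil => rfl
  | cons kv R ih => simpa [foldRepC, repC] using ih

lemma main_eq : ∀ (cs : List Char), foldRepC tblB.items cs = decodeGo cs := by
  have H : ∀ (n : Nat) (cs : List Char), cs.length ≤ n → foldRepC tblB.items cs = decodeGo cs := by
    intro n
    induction n with
    | zero =>
      intro cs h
      have : cs = [] := by cases cs <;> simp_all
      subst this
      rw [fold_nil, decodeGo]
    | succ n ih =>
      intro cs h
      cases cs with
      | nil => rw [fold_nil, decodeGo]
      | cons c t =>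
        cases hget : tblB.get? (List.take 7 (c :: t)) with
        | none =>
          have hfind : tblB.items.find? (fun p => p.1 == List.take 7 (c :: t)) = none := by
            rw [PySem.Dict.get?] at hget
            exact Option.map_eq_none_iff.mp hget
          have hnp : ∀ kv ∈ tblB.items, ¬ kv.1 <+: (c :: t) := by
            intro kv hkv hp
            have hlen := (tbl_props kv hkv).1
            have := List.prefix_iff_eq_take.mp hp
            rw [hlen] at this
            have h2 := List.find?_eq_none.mp hfind kv hkv
            simp only [beq_iff_eq] at h2
            exact h2 this
          rw [fold_cons tblB.items (fun kv hkv => (tbl_props kv hkv).2.2.2.2) tbl_disj c t hnp]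
          rw [decodeGo, hget]
          rw [ih t (by simpa using Nat.lt_succ_iff.mp (by simpa using h))]
        | some v =>
          obtain ⟨pr, hprf, hprv⟩ : ∃ pr, tblB.items.find? (fun p => p.1 == List.take 7 (c :: t)) = some pr ∧ pr.2 = v := by
            rw [PySem.Dict.get?] at hget
            rcases Option.map_eq_some_iff.mp hget with ⟨pr, h1, h2⟩
            exact ⟨pr, h1, h2⟩
          have hmem : pr ∈ tblB.items := List.mem_of_find?_eq_some hprf
          have hkey : pr.1 = List.take 7 (c :: t) := by
            have := List.find?_some hprf
            simpa using this
          have hlen7 : pr.1.length = 7 := (tbl_props pr hmem).1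
          have hlencs : 7 ≤ (c :: t).length := by
            rw [hkey] at hlen7
            simp only [List.length_take] at hlen7
            omega
          have hsplit : (c :: t) = pr.1 ++ List.drop 7 (c :: t) := by
            rw [hkey]; exact (List.take_append_drop 7 (c :: t)).symm
          have hmem2 : (pr.1, v) ∈ tblB.items := by rw [← hprv]; exact hmem
          calc foldRepC tblB.items (c :: t)
              = foldRepC tblB.items (pr.1 ++ List.drop 7 (c :: t)) := by rw [← hsplit]
            _ = v ++ foldRepC tblB.items (List.drop 7 (c :: t)) :=
                fold_append_key tblB.items pr.1 v (List.drop 7 (c :: t)) tbl_props hmem2 tbl_nodup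
            _ = v ++ decodeGo (List.drop 7 (c :: t)) := by
                rw [ih (List.drop 7 (c :: t)) (by simp only [List.length_drop, List.length_cons] at h ⊢; omega)]
            _ = decodeGo (c :: t) := by
                rw [decodeGo, hget]
                rfl
  exact fun cs => H cs.length cs le_rfl
lemma A_chars : ∀ (L : List (String × String)) (s : String), (∀ kv ∈ L, kv.1.toList ≠ []) →
    (L.foldl (fun s kv => PySem.Str.replace s kv.1 kv.2) s).toList =
      foldRepC (L.map (fun kv => (kv.1.toList, kv.2.toList))) s.toList := by
  intro L
  induction L with
  | nil => intro s _; simp [foldRepC]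
  | cons kv L' ih =>
    intro s hne
    simp only [List.foldl_cons, List.map_cons, foldRepC]
    rw [ih (PySem.Str.replace s kv.1 kv.2) (fun p hp => hne p (List.mem_cons_of_mem kv hp))]
    simp only [foldRepC]
    rw [PySem.Str.toList_replace, replace_eq_repC _ _ _ (hne kv List.mem_cons_self)]

set_option maxRecDepth 16384 in
lemma tables_agree : replA.items.map (fun kv => (kv.1.toList, kv.2.toList)) = tblB.items := by decide

set_option maxRecDepth 16384 in
lemma keysA_ne : ∀ kv ∈ replA.items, kv.1.toList ≠ [] := by decide

-- ===== VERDICT (by name: the statement is the Claim_ definition above) =====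
theorem decode_filename_spec : Claim_equal_decode_filename := by
  intro filename _
  show decode_filename filename = decode_filename_alt filename
  have h1 : (decode_filename filename).toList = decodeGo filename.toList := by
    rw [decode_filename, A_chars replA.items filename keysA_ne, tables_agree,
      main_eq filename.toList]
  have h2 : (decode_filename_alt filename).toList = decodeGo filename.toList := by
    rw [decode_filename_alt]
    exact String.toList_ofList
  exact String.toList_injective (h1.trans h2.symm)
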